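-- pv_equiv track=rewrite | github.com/machdyne/einszeit | sw/testrand.py | count_repeating_bytes
-- ===== SOURCE A (Python) =====
-- def count_repeating_bytes(data):
--     """Count consecutive repeated bytes"""
--     if len(data) < 2:
--         return 0
--
--     repeats = 0
--     for i in range(len(data) - 1):
--         if data[i] == data[i + 1]:
--             repeats += 1
--
--     return repeats
-- ===== SOURCE B (Python) =====
-- from itertools import groupby
--
-- def count_repeating_bytes(data):
--     """Count consecutive repeated bytes"""
--     runs = sum(1 for _ in groupby(data))
--     return len(data) - runs
-- ===== Notes on version B (the rewrite author's own statement) =====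
-- stated objective: idiomatic
-- what changed: B counts maximal runs of equal bytes with itertools.groupby and returns len(data) minus the run count, instead of A's index loop comparing data[i] with data[i+1].
import Mathlib
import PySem

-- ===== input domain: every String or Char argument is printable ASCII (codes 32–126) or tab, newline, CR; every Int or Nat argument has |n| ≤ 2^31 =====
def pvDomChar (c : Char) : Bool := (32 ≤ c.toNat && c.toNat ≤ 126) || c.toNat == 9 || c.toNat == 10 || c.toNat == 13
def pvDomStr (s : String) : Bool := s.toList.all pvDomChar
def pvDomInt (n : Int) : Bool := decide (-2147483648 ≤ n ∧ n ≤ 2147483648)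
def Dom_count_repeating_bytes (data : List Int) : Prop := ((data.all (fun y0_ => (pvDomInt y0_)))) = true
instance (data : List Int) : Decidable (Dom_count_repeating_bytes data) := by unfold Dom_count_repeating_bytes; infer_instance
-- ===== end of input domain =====

-- B replaces A's index loop comparing data[i] with data[i+1] by counting maximal runs of
-- equal consecutive bytes (itertools.groupby) and returning len(data) - runs (idiomatic).


-- ===== PORT A =====
def count_repeating_bytes (data : List Int) : Int :=
  if (data.length : Int) < 2 then 0
  else
    (PySem.List.pyRange 0 ((data.length : Int) - 1) 1).foldl
      (fun repeats i =>
        if PySem.List.pyGetD data i 0 = PySem.List.pyGetD data (i + 1) 0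
        then repeats + 1 else repeats) 0

-- ===== PORT B =====
-- number of maximal runs of equal consecutive elements (= number of groups of groupby)
def pvRuns : List Int → Int
  | [] => 0
  | [_] => 1
  | x :: y :: t => (if x = y then 0 else 1) + pvRuns (y :: t)

def count_repeating_bytes_alt (data : List Int) : Int :=
  (data.length : Int) - pvRuns data

-- ===== PRECONDITION & SPEC =====
def Spec_count_repeating_bytes (data : List Int) (out : Int) : Prop := out = count_repeating_bytes_alt data
instance (data : List Int) (out : Int) : Decidable (Spec_count_repeating_bytes data out) := by unfold Spec_count_repeating_bytes; infer_instance

-- ===== CLAIM (what is proved, stated in full; the proofs are below) =====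
def Claim_equal_count_repeating_bytes : Prop := ∀ (data : List Int), Dom_count_repeating_bytes data → Spec_count_repeating_bytes data (count_repeating_bytes data)

-- ===== LEMMAS AND PROOFS =====

-- the common pairwise characterisation: number of adjacent equal pairs
def pvPairs : List Int → Int
  | [] => 0
  | [_] => 0
  | x :: y :: t => (if x = y then 1 else 0) + pvPairs (y :: t)

-- B = pairs count
lemma alt_eq_pairs : ∀ data : List Int, count_repeating_bytes_alt data = pvPairs data := by
  intro data
  induction data with
  | nil => simp [count_repeating_bytes_alt, pvRuns, pvPairs]
  | cons x t ih =>
    cases t with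
    | nil => simp [count_repeating_bytes_alt, pvRuns, pvPairs]
    | cons y t' =>
      simp only [count_repeating_bytes_alt, pvRuns, pvPairs, List.length_cons] at *
      push_cast
      push_cast at ih
      omega

-- A = pairs count, via countP over List.range
lemma countP_pairs : ∀ data : List Int,
    (((List.range (data.length - 1)).countP
      (fun k => decide (data.getD k 0 = data.getD (k + 1) 0))) : Int)
    = pvPairs data := by
  intro data
  induction data with
  | nil => simp [pvPairs]
  | cons x t ih =>
    cases t with
    | nil => simp [pvPairs]
    | cons y t' =>
      simp only [List.length_cons, Nat.add_sub_cancel] at *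
      rw [List.range_succ_eq_map, List.countP_cons, List.countP_map]
      have hc : ((List.range (t'.length + 1 - 1)).countP
            ((fun k => decide ((x :: y :: t').getD k 0 = (x :: y :: t').getD (k + 1) 0)) ∘ Nat.succ))
          = ((List.range ((y :: t').length - 1)).countP
            (fun k => decide ((y :: t').getD k 0 = (y :: t').getD (k + 1) 0))) := by
        simp only [List.length_cons, Nat.add_sub_cancel]
        apply List.countP_congr
        intro k _
        simp [Function.comp, Nat.succ_eq_add_one]
      simp only [List.length_cons, Nat.add_sub_cancel] at hc
      rw [hc]
      have hx0 : (x :: y :: t').getD 0 0 = x := rfl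
      have hx1 : (x :: y :: t').getD (0 + 1) 0 = y := rfl
      rw [hx0, hx1]
      simp only [pvPairs]
      push_cast
      rw [ih]
      simp only [decide_eq_true_eq]
      split_ifs with hxy <;> ring

lemma a_eq_pairs : ∀ data : List Int, count_repeating_bytes data = pvPairs data := by
  intro data
  unfold count_repeating_bytes
  split_ifs with h
  · match data, h with
    | [], _ => simp [pvPairs]
    | [x], _ => simp [pvPairs]
    | x :: y :: t, h => simp at h; omega
  · rw [PySem.List.foldl_ite_add_one
      (p := fun i => PySem.List.pyGetD data i 0 = PySem.List.pyGetD data (i + 1) 0)]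
    rw [PySem.List.pyRange_one]
    simp only [Int.sub_zero, Int.zero_add, List.countP_map]
    have hlen : (((data.length : Int) - 1).toNat) = data.length - 1 := by omega
    rw [hlen, ← countP_pairs data]
    apply congrArg
    apply List.countP_congr
    intro k _
    simp only [Function.comp, decide_eq_true_eq]
    have h1 : ((k : Int) + 1) = ((k + 1 : Nat) : Int) := by push_cast; ring
    have h2 : PySem.List.pyGetD data ((k : Int) + 1) 0 = data.getD (k + 1) 0 := by
      rw [h1, PySem.List.pyGetD_natCast]
    rw [h2]
    simp [List.getD]

-- ===== VERDICT (by name: the statement is the Claim_ definition above) =====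
theorem count_repeating_bytes_spec : Claim_equal_count_repeating_bytes := by
  intro data _
  unfold Spec_count_repeating_bytes
  rw [a_eq_pairs, alt_eq_pairs]
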